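-- pv_equiv track=rewrite | github.com/SaltieRL/DistributedReplays | backend/blueprints/spa_api/service_layers/ml/advantage.py | get_ordered_columns
-- ===== SOURCE A (Python) =====
-- def get_ordered_columns(players_per_team: int):
--     """
--     Return an ordered list of column names to be passed to a game dataframe.
--     :param players_per_team: Determines how many player columns to return.
--     :type players_per_team: int
--     :return: A list of column names.
--     :rtype: List[str]
--     """
--     x = players_per_team
--     non_player = ['ball_pos_x', 'ball_pos_y', 'ball_pos_z', 'ball_rot_x', 'ball_rot_y', 'ball_rot_z',
--                   'ball_vel_x', 'ball_vel_y', 'ball_vel_z', 'ball_ang_vel_x', 'ball_ang_vel_y', 'ball_ang_vel_z',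
--                   'game_seconds_remaining', 'game_goal_number']
--     z_zero = ['z_0_pos_x', 'z_0_pos_y', 'z_0_pos_z', 'z_0_rot_x', 'z_0_rot_y', 'z_0_rot_z',
--               'z_0_vel_x', 'z_0_vel_y', 'z_0_vel_z', 'z_0_ang_vel_x', 'z_0_ang_vel_y', 'z_0_ang_vel_z',
--               'z_0_boost', 'z_0_boost_active', 'z_0_jump_active', 'z_0_double_jump_active', 'z_0_dodge_active',
--               'z_0_is_demo']
--     z_one = []
--     z_two = []
--     o_zero = []
--     o_one = []
--     o_two = []
--     for col in z_zero:
--         if x > 1: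
--             z_one.append(col.replace('0', '1', 1))
--         if x > 2:
--             z_two.append(col.replace('0', '2', 1))
--         o_zero.append(col.replace('z', 'o', 1))
--     if x > 1:
--         for col in o_zero:
--             o_one.append(col.replace('0', '1', 1))
--             if x > 2:
--                 o_two.append(col.replace('0', '2', 1))
--
--     columns_ordered = z_zero + z_one + z_two + o_zero + o_one + o_two + non_player
--     return columns_ordered
-- ===== SOURCE B (Python) =====
-- SUFFIXES = ['pos_x', 'pos_y', 'pos_z', 'rot_x', 'rot_y', 'rot_z',
--             'vel_x', 'vel_y', 'vel_z', 'ang_vel_x', 'ang_vel_y', 'ang_vel_z',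
--             'boost', 'boost_active', 'jump_active', 'double_jump_active',
--             'dodge_active', 'is_demo']
--
-- NON_PLAYER = ['ball_pos_x', 'ball_pos_y', 'ball_pos_z', 'ball_rot_x', 'ball_rot_y', 'ball_rot_z',
--               'ball_vel_x', 'ball_vel_y', 'ball_vel_z', 'ball_ang_vel_x', 'ball_ang_vel_y', 'ball_ang_vel_z',
--               'game_seconds_remaining', 'game_goal_number']
--
--
-- def get_ordered_columns(players_per_team: int):
--     x = players_per_team
--     indices = [0] + ([1] if x > 1 else []) + ([2] if x > 2 else [])
--     return [f'{team}_{i}_{suf}' for team in ('z', 'o')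
--             for i in indices for suf in SUFFIXES] + NON_PLAYER
-- ===== Notes on version B (the rewrite author's own statement) =====
-- stated objective: simpler
-- what changed: Replaces the hard-coded z_0 column list and the three .replace('0',...,1)/.replace('z','o',1) derivation loops with direct template generation: one comprehension over teams ('z','o'), the active index list [0](+[1 if x>1])(+[2 if x>2]) and a single suffix list.
import Mathlib
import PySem

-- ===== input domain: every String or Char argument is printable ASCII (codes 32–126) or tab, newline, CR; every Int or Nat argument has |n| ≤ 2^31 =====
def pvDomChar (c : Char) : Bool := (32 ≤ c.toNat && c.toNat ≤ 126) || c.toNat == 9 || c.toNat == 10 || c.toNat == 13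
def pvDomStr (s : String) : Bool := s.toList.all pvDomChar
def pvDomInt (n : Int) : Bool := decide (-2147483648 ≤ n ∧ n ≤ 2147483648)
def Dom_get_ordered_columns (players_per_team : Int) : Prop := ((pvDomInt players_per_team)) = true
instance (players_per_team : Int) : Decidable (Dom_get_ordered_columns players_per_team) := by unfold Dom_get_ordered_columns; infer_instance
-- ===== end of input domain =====

-- B replaces A's literal z_0 list plus three .replace-derivation loops with direct
-- template generation from one suffix list (objective: simpler).

-- ===== PORT A =====
-- Python str.replace(old, new, 1) (old nonempty): replace the FIRST occurrence only.
-- Exact for nonempty `old` (all of A's calls pass a single character).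
def pvReplFirst (s : List Char) (old new : List Char) : List Char :=
  match s with
  | [] => []
  | c :: cs =>
    if old.isPrefixOf (c :: cs) then new ++ (c :: cs).drop old.length
    else c :: pvReplFirst cs old new

def pyReplace1 (s old new : String) : String :=
  String.mk (pvReplFirst s.toList old.toList new.toList)

def get_ordered_columns (players_per_team : Int) : List String :=
  let x := players_per_team
  let non_player := ["ball_pos_x", "ball_pos_y", "ball_pos_z", "ball_rot_x", "ball_rot_y", "ball_rot_z",
                     "ball_vel_x", "ball_vel_y", "ball_vel_z", "ball_ang_vel_x", "ball_ang_vel_y", "ball_ang_vel_z",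
                     "game_seconds_remaining", "game_goal_number"]
  let z_zero := ["z_0_pos_x", "z_0_pos_y", "z_0_pos_z", "z_0_rot_x", "z_0_rot_y", "z_0_rot_z",
                 "z_0_vel_x", "z_0_vel_y", "z_0_vel_z", "z_0_ang_vel_x", "z_0_ang_vel_y", "z_0_ang_vel_z",
                 "z_0_boost", "z_0_boost_active", "z_0_jump_active", "z_0_double_jump_active", "z_0_dodge_active",
                 "z_0_is_demo"]
  -- for col in z_zero: build z_one, z_two, o_zero
  let st := z_zero.foldl
    (fun (st : List String × List String × List String) col =>
      let z_one := st.1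
      let z_two := st.2.1
      let o_zero := st.2.2
      let z_one := if x > 1 then z_one ++ [pyReplace1 col "0" "1"] else z_one
      let z_two := if x > 2 then z_two ++ [pyReplace1 col "0" "2"] else z_two
      (z_one, z_two, o_zero ++ [pyReplace1 col "z" "o"]))
    ([], [], [])
  let z_one := st.1
  let z_two := st.2.1
  let o_zero := st.2.2
  -- if x > 1: for col in o_zero: build o_one, o_two
  let st2 :=
    if x > 1 then
      o_zero.foldl
        (fun (st : List String × List String) col =>
          let o_one := st.1 ++ [pyReplace1 col "0" "1"]
          let o_two := if x > 2 then st.2 ++ [pyReplace1 col "0" "2"] else st.2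
          (o_one, o_two))
        ([], [])
    else ([], [])
  z_zero ++ z_one ++ z_two ++ o_zero ++ st2.1 ++ st2.2 ++ non_player

-- ===== PORT B =====
def pvSuffixes : List String :=
  ["pos_x", "pos_y", "pos_z", "rot_x", "rot_y", "rot_z",
   "vel_x", "vel_y", "vel_z", "ang_vel_x", "ang_vel_y", "ang_vel_z",
   "boost", "boost_active", "jump_active", "double_jump_active",
   "dodge_active", "is_demo"]

def pvNonPlayer : List String :=
  ["ball_pos_x", "ball_pos_y", "ball_pos_z", "ball_rot_x", "ball_rot_y", "ball_rot_z",
   "ball_vel_x", "ball_vel_y", "ball_vel_z", "ball_ang_vel_x", "ball_ang_vel_y", "ball_ang_vel_z",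
   "game_seconds_remaining", "game_goal_number"]

def get_ordered_columns_alt (players_per_team : Int) : List String :=
  let x := players_per_team
  let indices : List Int := [0] ++ (if x > 1 then [1] else []) ++ (if x > 2 then [2] else [])
  (["z", "o"].flatMap (fun team =>
    indices.flatMap (fun i =>
      pvSuffixes.map (fun suf => team ++ "_" ++ PySem.Int.toStr i ++ "_" ++ suf)))) ++ pvNonPlayer

-- ===== PRECONDITION & SPEC =====
def Spec_get_ordered_columns (players_per_team : Int) (out : List String) : Prop := out = get_ordered_columns_alt players_per_team
instance (players_per_team : Int) (out : List String) : Decidable (Spec_get_ordered_columns players_per_team out) := by unfold Spec_get_ordered_columns; infer_instance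

-- ===== CLAIM (what is proved, stated in full; the proofs are below) =====
def Claim_equal_get_ordered_columns : Prop := ∀ (players_per_team : Int), Dom_get_ordered_columns players_per_team → Spec_get_ordered_columns players_per_team (get_ordered_columns players_per_team)

-- ===== LEMMAS AND PROOFS =====
-- Both ports depend on the input only through the truth of x > 1 and x > 2.
theorem pvA_cond (x y : Int) (h1 : (x > 1) = (y > 1)) (h2 : (x > 2) = (y > 2)) :
    get_ordered_columns x = get_ordered_columns y := by
  simp only [get_ordered_columns, h1, h2]

theorem pvB_cond (x y : Int) (h1 : (x > 1) = (y > 1)) (h2 : (x > 2) = (y > 2)) :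
    get_ordered_columns_alt x = get_ordered_columns_alt y := by
  simp only [get_ordered_columns_alt, h1, h2]

-- ===== VERDICT (by name: the statement is the Claim_ definition above) =====
theorem get_ordered_columns_spec : Claim_equal_get_ordered_columns := by
  intro x _
  unfold Spec_get_ordered_columns
  rcases lt_or_ge 2 x with h2 | h2
  · have e1 : (x > 1) = ((3 : Int) > 1) := by simp; omega
    have e2 : (x > 2) = ((3 : Int) > 2) := by simp; omega
    rw [pvA_cond x 3 e1 e2, pvB_cond x 3 e1 e2]; decide
  · rcases lt_or_ge 1 x with h1 | h1
    · have e1 : (x > 1) = ((2 : Int) > 1) := by simp; omega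
      have e2 : (x > 2) = ((2 : Int) > 2) := by simp; omega
      rw [pvA_cond x 2 e1 e2, pvB_cond x 2 e1 e2]; decide
    · have e1 : (x > 1) = ((1 : Int) > 1) := by simp; omega
      have e2 : (x > 2) = ((1 : Int) > 2) := by simp; omega
      rw [pvA_cond x 1 e1 e2, pvB_cond x 1 e1 e2]; decide
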